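-- pv_equiv track=rewrite | github.com/pypi-data/pypi-mirror-316 | packages/django-music-publisher/django_music_publisher-24.12.1-py2.py3-none-any.whl/music_publisher/admin.py | get_labels_for_csv
-- ===== SOURCE A (Python) =====
-- def get_labels_for_csv(works, repeating_column_nr=0, simple=False):
--     """Return the list of labels for the CSV file."""
--     labels = [
--         "Work ID",
--         "Work Title",
--         "ISWC",
--         "Original Title",
--         "Library",
--         "CD Identifier",
--     ]
--     alt_title_max = repeating_column_nr
--     writer_max = repeating_column_nr
--     writer_with_publisher_max = repeating_column_nr
--     artist_max = repeating_column_nr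
--     xrf_max = repeating_column_nr
--     recording_max = repeating_column_nr
--     for work in works:
--         alt_title_max = max(alt_title_max, len(work.get("other_titles")))
--         writer_max = max(writer_max, len(work.get("writers")))
--         ops = 0
--         for w in work.get("writers"):
--             if w.get("original_publishers"):
--                 ops += 1
--         writer_with_publisher_max = max(writer_with_publisher_max, ops)
--         recording_max = max(recording_max, len(work.get("recordings")))
--         artist_max = max(artist_max, len(work.get("performing_artists")))
--         xrf_max = max(xrf_max, len(work.get("cross_references")))
--     for i in range(alt_title_max):
--         labels.append("Alt Title {}".format(i + 1))
--     for i in range(writer_max):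
--         labels.append("Writer {} Last".format(i + 1))
--         labels.append("Writer {} First".format(i + 1))
--         labels.append("Writer {} IPI".format(i + 1))
--         labels.append("Writer {} PRO".format(i + 1))
--         if not simple:
--             labels.append("Writer {} MRO".format(i + 1))
--             labels.append("Writer {} SRO".format(i + 1))
--         labels.append("Writer {} Role".format(i + 1))
--         labels.append("Writer {} Manuscript Share".format(i + 1))
--         if not simple:
--             labels.append("Writer {} PR Share".format(i + 1))
--             labels.append("Writer {} MR Share".format(i + 1))
--             labels.append("Writer {} SR Share".format(i + 1))
--         labels.append("Writer {} Controlled".format(i + 1))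
--         if i < writer_with_publisher_max:
--             labels.append("Writer {} SAAN".format(i + 1))
--         labels.append("Writer {} Account Number".format(i + 1))
--         if not simple and i < writer_with_publisher_max:
--             labels.append("Writer {} Publisher Name".format(i + 1))
--             labels.append("Writer {} Publisher IPI".format(i + 1))
--             labels.append("Writer {} Publisher PRO".format(i + 1))
--             labels.append("Writer {} Publisher MRO".format(i + 1))
--             labels.append("Writer {} Publisher SRO".format(i + 1))
--             labels.append("Writer {} Publisher PR Share".format(i + 1))
--             labels.append("Writer {} Publisher MR Share".format(i + 1))
--             labels.append("Writer {} Publisher SR Share".format(i + 1))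
--     for i in range(recording_max):
--         if not simple:
--             labels.append("Recording {} ID".format(i + 1))
--             labels.append("Recording {} Recording Title".format(i + 1))
--             labels.append("Recording {} Version Title".format(i + 1))
--         labels.append("Recording {} Release Date".format(i + 1))
--         labels.append("Recording {} Duration".format(i + 1))
--         labels.append("Recording {} ISRC".format(i + 1))
--         if not simple:
--             labels.append("Recording {} Artist Last".format(i + 1))
--             labels.append("Recording {} Artist First".format(i + 1))
--             labels.append("Recording {} Artist ISNI".format(i + 1))
--             labels.append("Recording {} Record Label".format(i + 1))
--     for i in range(artist_max):
--         labels.append("Artist {} Last".format(i + 1))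
--         labels.append("Artist {} First".format(i + 1))
--         labels.append("Artist {} ISNI".format(i + 1))
--     if not simple:
--         for i in range(xrf_max):
--             labels.append("Reference {} CMO".format(i + 1))
--             labels.append("Reference {} ID".format(i + 1))
--     return labels
-- ===== SOURCE B (Python) =====
-- def get_labels_for_csv(works, repeating_column_nr=0, simple=False):
--     """Return the list of labels for the CSV file."""
--     works = list(works)
--
--     def col_max(counter):
--         return max([repeating_column_nr] + [counter(w) for w in works])
--
--     pub_max = col_max(
--         lambda w: len([x for x in w.get("writers") if x.get("original_publishers")]))
--
--     # flags: 0 = always, 1 = full export only, 2 = writer has a publisher,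
--     # 3 = full export and writer has a publisher
--     ALWAYS, FULL, PUB, FULL_PUB = 0, 1, 2, 3
--     schema = [
--         ("Alt Title ", col_max(lambda w: len(w.get("other_titles"))), [
--             ("", ALWAYS)]),
--         ("Writer ", col_max(lambda w: len(w.get("writers"))), [
--             (" Last", ALWAYS), (" First", ALWAYS), (" IPI", ALWAYS), (" PRO", ALWAYS),
--             (" MRO", FULL), (" SRO", FULL),
--             (" Role", ALWAYS), (" Manuscript Share", ALWAYS),
--             (" PR Share", FULL), (" MR Share", FULL), (" SR Share", FULL),
--             (" Controlled", ALWAYS),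
--             (" SAAN", PUB),
--             (" Account Number", ALWAYS),
--             (" Publisher Name", FULL_PUB), (" Publisher IPI", FULL_PUB),
--             (" Publisher PRO", FULL_PUB), (" Publisher MRO", FULL_PUB),
--             (" Publisher SRO", FULL_PUB), (" Publisher PR Share", FULL_PUB),
--             (" Publisher MR Share", FULL_PUB), (" Publisher SR Share", FULL_PUB)]),
--         ("Recording ", col_max(lambda w: len(w.get("recordings"))), [
--             (" ID", FULL), (" Recording Title", FULL), (" Version Title", FULL),
--             (" Release Date", ALWAYS), (" Duration", ALWAYS), (" ISRC", ALWAYS),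
--             (" Artist Last", FULL), (" Artist First", FULL), (" Artist ISNI", FULL),
--             (" Record Label", FULL)]),
--         ("Artist ", col_max(lambda w: len(w.get("performing_artists"))), [
--             (" Last", ALWAYS), (" First", ALWAYS), (" ISNI", ALWAYS)]),
--         ("Reference ", col_max(lambda w: len(w.get("cross_references"))), [
--             (" CMO", FULL), (" ID", FULL)]),
--     ]
--
--     def emit(flag, i):
--         return (flag == ALWAYS
--                 or (flag == FULL and not simple)
--                 or (flag == PUB and i < pub_max)
--                 or (flag == FULL_PUB and not simple and i < pub_max))
--
--     return ["Work ID", "Work Title", "ISWC", "Original Title", "Library",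
--             "CD Identifier"] + [
--         "{}{}{}".format(prefix, i + 1, suffix)
--         for prefix, count, cols in schema
--         for i in range(count)
--         for suffix, flag in cols
--         if emit(flag, i)]
-- ===== Notes on version B (the rewrite author's own statement) =====
-- stated objective: alternative
-- what changed: A's single-pass scan carrying six running maxima and its six hard-coded label-appending loops are replaced by a table-driven design: a generic col_max computes each category's maximum independently over the materialized works list, and one generic interpreter expands a declarative schema of (prefix, count, [(suffix, flag)]) rows through a flag predicate instead of hard-coded emission code.
import Mathlib
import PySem

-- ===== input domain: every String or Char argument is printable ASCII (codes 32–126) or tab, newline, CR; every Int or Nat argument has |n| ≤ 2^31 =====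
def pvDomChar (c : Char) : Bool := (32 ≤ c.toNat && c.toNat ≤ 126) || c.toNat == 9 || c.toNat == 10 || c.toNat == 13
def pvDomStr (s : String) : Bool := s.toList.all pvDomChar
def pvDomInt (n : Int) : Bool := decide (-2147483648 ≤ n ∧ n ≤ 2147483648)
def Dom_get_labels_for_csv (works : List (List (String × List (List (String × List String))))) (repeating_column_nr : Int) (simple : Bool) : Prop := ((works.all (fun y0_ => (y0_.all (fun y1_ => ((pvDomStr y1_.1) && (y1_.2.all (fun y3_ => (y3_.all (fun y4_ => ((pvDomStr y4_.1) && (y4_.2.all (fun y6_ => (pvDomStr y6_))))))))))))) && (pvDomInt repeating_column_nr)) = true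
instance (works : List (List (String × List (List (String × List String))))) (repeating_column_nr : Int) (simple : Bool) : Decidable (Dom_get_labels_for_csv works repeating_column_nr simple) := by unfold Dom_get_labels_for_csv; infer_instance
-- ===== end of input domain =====

-- B replaces A's single combined scan (one fold carrying six running maxima) and its six
-- hard-coded label-emitting loops by a table-driven design: independent per-category maxima
-- via a generic col_max, and one generic interpreter over a declarative schema of
-- (prefix, count, [(suffix, flag)]) rows. Objective: alternative decomposition, same cost.

-- ===== PORT A =====
-- work.get(key) on the dict (assoc list); Python's raise on a missing key is excluded by Pre_
def pvGet (w : List (String × List (List (String × List String)))) (k : String) : List (List (String × List String)) :=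
  ((PySem.Dict.mk w).get? k).getD []

-- truthiness of w.get("original_publishers"): None and [] are falsy
def pvHasPub (w : List (String × List String)) : Bool :=
  !(((PySem.Dict.mk w).get? "original_publishers").getD []).isEmpty

-- the body of A's single scan: update the six running maxima (alt, writer, writer_with_publisher, recording, artist, xrf)
def maxStepA (st : Int × Int × Int × Int × Int × Int) (work : List (String × List (List (String × List String)))) : Int × Int × Int × Int × Int × Int :=
  let alt := max st.1 (PySem.List.len (pvGet work "other_titles"))
  let wm := max st.2.1 (PySem.List.len (pvGet work "writers"))
  let ops := (pvGet work "writers").foldl (fun ops w => if pvHasPub w then ops + 1 else ops) (0 : Int)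
  let wwp := max st.2.2.1 ops
  let rm := max st.2.2.2.1 (PySem.List.len (pvGet work "recordings"))
  let am := max st.2.2.2.2.1 (PySem.List.len (pvGet work "performing_artists"))
  let xm := max st.2.2.2.2.2 (PySem.List.len (pvGet work "cross_references"))
  (alt, wm, wwp, rm, am, xm)

def altLoopA (m : Int) (labels : List String) : List String :=
  (PySem.List.pyRange 0 m 1).foldl (fun acc i =>
    acc ++ ["Alt Title " ++ PySem.Int.toStr (i + 1)]) labels

def writerLoopA (simple : Bool) (wm wwp : Int) (labels : List String) : List String :=
  (PySem.List.pyRange 0 wm 1).foldl (fun acc i =>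
    let acc := acc ++ ["Writer " ++ PySem.Int.toStr (i + 1) ++ " Last"]
    let acc := acc ++ ["Writer " ++ PySem.Int.toStr (i + 1) ++ " First"]
    let acc := acc ++ ["Writer " ++ PySem.Int.toStr (i + 1) ++ " IPI"]
    let acc := acc ++ ["Writer " ++ PySem.Int.toStr (i + 1) ++ " PRO"]
    let acc := if !simple then
        let acc := acc ++ ["Writer " ++ PySem.Int.toStr (i + 1) ++ " MRO"]
        acc ++ ["Writer " ++ PySem.Int.toStr (i + 1) ++ " SRO"]
      else acc
    let acc := acc ++ ["Writer " ++ PySem.Int.toStr (i + 1) ++ " Role"]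
    let acc := acc ++ ["Writer " ++ PySem.Int.toStr (i + 1) ++ " Manuscript Share"]
    let acc := if !simple then
        let acc := acc ++ ["Writer " ++ PySem.Int.toStr (i + 1) ++ " PR Share"]
        let acc := acc ++ ["Writer " ++ PySem.Int.toStr (i + 1) ++ " MR Share"]
        acc ++ ["Writer " ++ PySem.Int.toStr (i + 1) ++ " SR Share"]
      else acc
    let acc := acc ++ ["Writer " ++ PySem.Int.toStr (i + 1) ++ " Controlled"]
    let acc := if decide (i < wwp) then
        acc ++ ["Writer " ++ PySem.Int.toStr (i + 1) ++ " SAAN"]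
      else acc
    let acc := acc ++ ["Writer " ++ PySem.Int.toStr (i + 1) ++ " Account Number"]
    if !simple && decide (i < wwp) then
        let acc := acc ++ ["Writer " ++ PySem.Int.toStr (i + 1) ++ " Publisher Name"]
        let acc := acc ++ ["Writer " ++ PySem.Int.toStr (i + 1) ++ " Publisher IPI"]
        let acc := acc ++ ["Writer " ++ PySem.Int.toStr (i + 1) ++ " Publisher PRO"]
        let acc := acc ++ ["Writer " ++ PySem.Int.toStr (i + 1) ++ " Publisher MRO"]
        let acc := acc ++ ["Writer " ++ PySem.Int.toStr (i + 1) ++ " Publisher SRO"]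
        let acc := acc ++ ["Writer " ++ PySem.Int.toStr (i + 1) ++ " Publisher PR Share"]
        let acc := acc ++ ["Writer " ++ PySem.Int.toStr (i + 1) ++ " Publisher MR Share"]
        acc ++ ["Writer " ++ PySem.Int.toStr (i + 1) ++ " Publisher SR Share"]
      else acc) labels

def recLoopA (simple : Bool) (m : Int) (labels : List String) : List String :=
  (PySem.List.pyRange 0 m 1).foldl (fun acc i =>
    let acc := if !simple then
        let acc := acc ++ ["Recording " ++ PySem.Int.toStr (i + 1) ++ " ID"]
        let acc := acc ++ ["Recording " ++ PySem.Int.toStr (i + 1) ++ " Recording Title"]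
        acc ++ ["Recording " ++ PySem.Int.toStr (i + 1) ++ " Version Title"]
      else acc
    let acc := acc ++ ["Recording " ++ PySem.Int.toStr (i + 1) ++ " Release Date"]
    let acc := acc ++ ["Recording " ++ PySem.Int.toStr (i + 1) ++ " Duration"]
    let acc := acc ++ ["Recording " ++ PySem.Int.toStr (i + 1) ++ " ISRC"]
    if !simple then
        let acc := acc ++ ["Recording " ++ PySem.Int.toStr (i + 1) ++ " Artist Last"]
        let acc := acc ++ ["Recording " ++ PySem.Int.toStr (i + 1) ++ " Artist First"]
        let acc := acc ++ ["Recording " ++ PySem.Int.toStr (i + 1) ++ " Artist ISNI"]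
        acc ++ ["Recording " ++ PySem.Int.toStr (i + 1) ++ " Record Label"]
      else acc) labels

def artistLoopA (m : Int) (labels : List String) : List String :=
  (PySem.List.pyRange 0 m 1).foldl (fun acc i =>
    let acc := acc ++ ["Artist " ++ PySem.Int.toStr (i + 1) ++ " Last"]
    let acc := acc ++ ["Artist " ++ PySem.Int.toStr (i + 1) ++ " First"]
    acc ++ ["Artist " ++ PySem.Int.toStr (i + 1) ++ " ISNI"]) labels

def xrfLoopA (m : Int) (labels : List String) : List String :=
  (PySem.List.pyRange 0 m 1).foldl (fun acc i =>
    let acc := acc ++ ["Reference " ++ PySem.Int.toStr (i + 1) ++ " CMO"]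
    acc ++ ["Reference " ++ PySem.Int.toStr (i + 1) ++ " ID"]) labels

def get_labels_for_csv (works : List (List (String × List (List (String × List String))))) (repeating_column_nr : Int) (simple : Bool) : List String :=
  let labels : List String := ["Work ID", "Work Title", "ISWC", "Original Title", "Library", "CD Identifier"]
  let st := works.foldl maxStepA
    (repeating_column_nr, repeating_column_nr, repeating_column_nr, repeating_column_nr, repeating_column_nr, repeating_column_nr)
  let labels := altLoopA st.1 labels
  let labels := writerLoopA simple st.2.1 st.2.2.1 labels
  let labels := recLoopA simple st.2.2.2.1 labels
  let labels := artistLoopA st.2.2.2.2.1 labels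
  let labels := if !simple then xrfLoopA st.2.2.2.2.2 labels else labels
  labels

-- ===== PORT B =====
-- col_max: max([repeating_column_nr] + [counter(w) for w in works])
def pvColMax (works : List (List (String × List (List (String × List String))))) (rcn : Int)
    (counter : List (String × List (List (String × List String))) → Int) : Int :=
  (PySem.List.max? (rcn :: works.map counter) (fun x => x)).getD rcn

-- emit(flag, i): flags 0 = always, 1 = full export only, 2 = has publisher, 3 = full and has publisher
def pvEmit (simple : Bool) (pub_max : Int) (flag i : Int) : Bool :=
  flag == 0 || (flag == 1 && !simple) || (flag == 2 && decide (i < pub_max))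
    || (flag == 3 && (!simple && decide (i < pub_max)))

def pvWriterTable : List (String × Int) :=
  [(" Last", 0), (" First", 0), (" IPI", 0), (" PRO", 0),
   (" MRO", 1), (" SRO", 1),
   (" Role", 0), (" Manuscript Share", 0),
   (" PR Share", 1), (" MR Share", 1), (" SR Share", 1),
   (" Controlled", 0),
   (" SAAN", 2),
   (" Account Number", 0),
   (" Publisher Name", 3), (" Publisher IPI", 3), (" Publisher PRO", 3), (" Publisher MRO", 3),
   (" Publisher SRO", 3), (" Publisher PR Share", 3), (" Publisher MR Share", 3), (" Publisher SR Share", 3)]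

def pvRecTable : List (String × Int) :=
  [(" ID", 1), (" Recording Title", 1), (" Version Title", 1),
   (" Release Date", 0), (" Duration", 0), (" ISRC", 0),
   (" Artist Last", 1), (" Artist First", 1), (" Artist ISNI", 1), (" Record Label", 1)]

def get_labels_for_csv_alt (works : List (List (String × List (List (String × List String))))) (repeating_column_nr : Int) (simple : Bool) : List String :=
  let pub_max := pvColMax works repeating_column_nr
    (fun w => PySem.List.len ((pvGet w "writers").filter pvHasPub))
  let schema : List (String × Int × List (String × Int)) :=
    [("Alt Title ", pvColMax works repeating_column_nr (fun w => PySem.List.len (pvGet w "other_titles")), [("", 0)]),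
     ("Writer ", pvColMax works repeating_column_nr (fun w => PySem.List.len (pvGet w "writers")), pvWriterTable),
     ("Recording ", pvColMax works repeating_column_nr (fun w => PySem.List.len (pvGet w "recordings")), pvRecTable),
     ("Artist ", pvColMax works repeating_column_nr (fun w => PySem.List.len (pvGet w "performing_artists")), [(" Last", 0), (" First", 0), (" ISNI", 0)]),
     ("Reference ", pvColMax works repeating_column_nr (fun w => PySem.List.len (pvGet w "cross_references")), [(" CMO", 1), (" ID", 1)])]
  ["Work ID", "Work Title", "ISWC", "Original Title", "Library", "CD Identifier"]
  ++ schema.flatMap (fun s =>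
       (PySem.List.pyRange 0 s.2.1 1).flatMap (fun i =>
         (s.2.2.filter (fun sc => pvEmit simple pub_max sc.2 i)).map
           (fun sc => s.1 ++ PySem.Int.toStr (i + 1) ++ sc.1)))

-- ===== PRECONDITION & SPEC =====
-- Pre_ excludes works missing one of the five list-valued keys: there Python A raises
-- (TypeError from len(None)) and Python B raises too (TypeError from iterating/len on None).
def Pre_get_labels_for_csv (works : List (List (String × List (List (String × List String))))) (repeating_column_nr : Int) (simple : Bool) : Prop :=
  ∀ work ∈ works,
    ((PySem.Dict.mk work).get? "other_titles").isSome = true ∧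
    ((PySem.Dict.mk work).get? "writers").isSome = true ∧
    ((PySem.Dict.mk work).get? "recordings").isSome = true ∧
    ((PySem.Dict.mk work).get? "performing_artists").isSome = true ∧
    ((PySem.Dict.mk work).get? "cross_references").isSome = true
instance (works : List (List (String × List (List (String × List String))))) (repeating_column_nr : Int) (simple : Bool) : Decidable (Pre_get_labels_for_csv works repeating_column_nr simple) := by unfold Pre_get_labels_for_csv; infer_instance

def pvWitness_get_labels_for_csv : (List (List (String × List (List (String × List String))))) × Int × Bool :=
  ([[("other_titles", [[("t", ["x"])]]), ("writers", []), ("recordings", []),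
     ("performing_artists", []), ("cross_references", [])]], 1, false)

def Spec_get_labels_for_csv (works : List (List (String × List (List (String × List String))))) (repeating_column_nr : Int) (simple : Bool) (out : List String) : Prop := out = get_labels_for_csv_alt works repeating_column_nr simple
instance (works : List (List (String × List (List (String × List String))))) (repeating_column_nr : Int) (simple : Bool) (out : List String) : Decidable (Spec_get_labels_for_csv works repeating_column_nr simple out) := by unfold Spec_get_labels_for_csv; infer_instance

-- ===== CLAIM (what is proved, stated in full; the proofs are below) =====
def Claim_equal_get_labels_for_csv : Prop := ∀ (works : List (List (String × List (List (String × List String))))) (repeating_column_nr : Int) (simple : Bool), Dom_get_labels_for_csv works repeating_column_nr simple → Pre_get_labels_for_csv works repeating_column_nr simple → Spec_get_labels_for_csv works repeating_column_nr simple (get_labels_for_csv works repeating_column_nr simple)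

-- ===== LEMMAS AND PROOFS =====

-- B's max([rcn] + [counter(w) for w in works]) is the running max started at rcn
theorem pvColMax_eq_foldl (works : List (List (String × List (List (String × List String))))) (rcn : Int)
    (counter : List (String × List (List (String × List String))) → Int) :
    pvColMax works rcn counter = (works.map counter).foldl max rcn := by
  simp [pvColMax, PySem.List.max?_id_cons]

-- A's six-field fold computes the six independent running maxima
theorem foldA_eq (works : List (List (String × List (List (String × List String)))))
    (a b c d e f : Int) :
    works.foldl maxStepA (a, b, c, d, e, f)
    = (works.foldl (fun m w => max m (PySem.List.len (pvGet w "other_titles"))) a,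
       works.foldl (fun m w => max m (PySem.List.len (pvGet w "writers"))) b,
       works.foldl (fun m w => max m (PySem.List.len ((pvGet w "writers").filter pvHasPub))) c,
       works.foldl (fun m w => max m (PySem.List.len (pvGet w "recordings"))) d,
       works.foldl (fun m w => max m (PySem.List.len (pvGet w "performing_artists"))) e,
       works.foldl (fun m w => max m (PySem.List.len (pvGet w "cross_references"))) f) := by
  induction works generalizing a b c d e f with
  | nil => rfl
  | cons w ws ih =>
    have hops : (pvGet w "writers").foldl (fun ops x => if pvHasPub x then ops + 1 else ops) (0 : Int)
        = PySem.List.len ((pvGet w "writers").filter pvHasPub) := by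
      simpa [PySem.List.len, List.countP_eq_length_filter] using
        PySem.List.foldl_if_add_one pvHasPub (pvGet w "writers") 0
    simp only [List.foldl_cons, ih, maxStepA, hops]

theorem altLoopA_eq (m wwp : Int) (simple : Bool) (labels : List String) :
    altLoopA m labels
    = labels ++ (PySem.List.pyRange 0 m 1).flatMap (fun i =>
        (([("", (0 : Int))]).filter (fun sc => pvEmit simple wwp sc.2 i)).map
          (fun sc => "Alt Title " ++ PySem.Int.toStr (i + 1) ++ sc.1)) := by
  unfold altLoopA
  trans ((PySem.List.pyRange 0 m 1).foldl
      (fun acc i => acc ++ (([("", (0 : Int))]).filter (fun sc => pvEmit simple wwp sc.2 i)).map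
        (fun sc => "Alt Title " ++ PySem.Int.toStr (i + 1) ++ sc.1)) labels)
  · exact PySem.List.foldl_congr_mem _ _ _ _ (by intro acc x _; simp [pvEmit])
  · exact PySem.List.foldl_append_eq_flatMap ..

theorem writerLoopA_eq (simple : Bool) (wm wwp : Int) (labels : List String) :
    writerLoopA simple wm wwp labels
    = labels ++ (PySem.List.pyRange 0 wm 1).flatMap (fun i =>
        (pvWriterTable.filter (fun sc => pvEmit simple wwp sc.2 i)).map
          (fun sc => "Writer " ++ PySem.Int.toStr (i + 1) ++ sc.1)) := by
  unfold writerLoopA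
  trans ((PySem.List.pyRange 0 wm 1).foldl
      (fun acc i => acc ++ (pvWriterTable.filter (fun sc => pvEmit simple wwp sc.2 i)).map
        (fun sc => "Writer " ++ PySem.Int.toStr (i + 1) ++ sc.1)) labels)
  · exact PySem.List.foldl_congr_mem _ _ _ _
      (by intro acc x _; cases simple <;> by_cases h : x < wwp <;> simp [pvWriterTable, pvEmit, h])
  · exact PySem.List.foldl_append_eq_flatMap ..

theorem recLoopA_eq (simple : Bool) (m wwp : Int) (labels : List String) :
    recLoopA simple m labels
    = labels ++ (PySem.List.pyRange 0 m 1).flatMap (fun i =>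
        (pvRecTable.filter (fun sc => pvEmit simple wwp sc.2 i)).map
          (fun sc => "Recording " ++ PySem.Int.toStr (i + 1) ++ sc.1)) := by
  unfold recLoopA
  trans ((PySem.List.pyRange 0 m 1).foldl
      (fun acc i => acc ++ (pvRecTable.filter (fun sc => pvEmit simple wwp sc.2 i)).map
        (fun sc => "Recording " ++ PySem.Int.toStr (i + 1) ++ sc.1)) labels)
  · exact PySem.List.foldl_congr_mem _ _ _ _
      (by intro acc x _; cases simple <;> simp [pvRecTable, pvEmit])
  · exact PySem.List.foldl_append_eq_flatMap ..

theorem artistLoopA_eq (m wwp : Int) (simple : Bool) (labels : List String) :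
    artistLoopA m labels
    = labels ++ (PySem.List.pyRange 0 m 1).flatMap (fun i =>
        (([(" Last", (0 : Int)), (" First", 0), (" ISNI", 0)]).filter
            (fun sc => pvEmit simple wwp sc.2 i)).map
          (fun sc => "Artist " ++ PySem.Int.toStr (i + 1) ++ sc.1)) := by
  unfold artistLoopA
  trans ((PySem.List.pyRange 0 m 1).foldl
      (fun acc i => acc ++ (([(" Last", (0 : Int)), (" First", 0), (" ISNI", 0)]).filter
          (fun sc => pvEmit simple wwp sc.2 i)).map
        (fun sc => "Artist " ++ PySem.Int.toStr (i + 1) ++ sc.1)) labels)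
  · exact PySem.List.foldl_congr_mem _ _ _ _ (by intro acc x _; simp [pvEmit])
  · exact PySem.List.foldl_append_eq_flatMap ..

theorem xrfLoopA_eq (m wwp : Int) (labels : List String) :
    xrfLoopA m labels
    = labels ++ (PySem.List.pyRange 0 m 1).flatMap (fun i =>
        (([(" CMO", (1 : Int)), (" ID", 1)]).filter
            (fun sc => pvEmit false wwp sc.2 i)).map
          (fun sc => "Reference " ++ PySem.Int.toStr (i + 1) ++ sc.1)) := by
  unfold xrfLoopA
  trans ((PySem.List.pyRange 0 m 1).foldl
      (fun acc i => acc ++ (([(" CMO", (1 : Int)), (" ID", 1)]).filter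
          (fun sc => pvEmit false wwp sc.2 i)).map
        (fun sc => "Reference " ++ PySem.Int.toStr (i + 1) ++ sc.1)) labels)
  · exact PySem.List.foldl_congr_mem _ _ _ _ (by intro acc x _; simp [pvEmit])
  · exact PySem.List.foldl_append_eq_flatMap ..

-- when simple, every Reference column is filtered out by its FULL flag
theorem xrf_simple_nil (m wwp : Int) :
    (PySem.List.pyRange 0 m 1).flatMap (fun i =>
        (([(" CMO", (1 : Int)), (" ID", 1)]).filter
            (fun sc => pvEmit true wwp sc.2 i)).map
          (fun sc => "Reference " ++ PySem.Int.toStr (i + 1) ++ sc.1)) = [] := by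
  simp [pvEmit]

-- ===== VERDICT (by name: the statement is the Claim_ definition above) =====
theorem get_labels_for_csv_spec : Claim_equal_get_labels_for_csv := by
  intro works rcn simple _ _
  unfold Spec_get_labels_for_csv get_labels_for_csv get_labels_for_csv_alt
  simp only [foldA_eq, pvColMax_eq_foldl, List.foldl_map]
  simp only [List.flatMap_cons, List.flatMap_nil]
  cases simple with
  | false =>
    rw [altLoopA_eq _ (works.foldl (fun m w => max m (PySem.List.len ((pvGet w "writers").filter pvHasPub))) rcn) false,
        writerLoopA_eq,
        recLoopA_eq _ _ (works.foldl (fun m w => max m (PySem.List.len ((pvGet w "writers").filter pvHasPub))) rcn),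
        artistLoopA_eq _ (works.foldl (fun m w => max m (PySem.List.len ((pvGet w "writers").filter pvHasPub))) rcn) false,
        xrfLoopA_eq _ (works.foldl (fun m w => max m (PySem.List.len ((pvGet w "writers").filter pvHasPub))) rcn)]
    simp [List.append_assoc]
  | true =>
    rw [altLoopA_eq _ (works.foldl (fun m w => max m (PySem.List.len ((pvGet w "writers").filter pvHasPub))) rcn) true,
        writerLoopA_eq,
        recLoopA_eq _ _ (works.foldl (fun m w => max m (PySem.List.len ((pvGet w "writers").filter pvHasPub))) rcn),
        artistLoopA_eq _ (works.foldl (fun m w => max m (PySem.List.len ((pvGet w "writers").filter pvHasPub))) rcn) true]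
    simp [xrf_simple_nil, List.append_assoc]
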